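-- pv_equiv track=rewrite | github.com/Ibtissam0320/Exposed_by_Design | attacks/attack1_tail.py | bfs_inward_layers
-- ===== SOURCE A (Python) =====
-- def bfs_inward_layers(start, in_neighbors, max_hop):
--     """
--     BFS following IN edges only (who points to the node).
--     Returns dict: layer_index -> set of nodes in that layer.
--     Used for ni_tail.
--     """
--     start = str(start)
--     layers = {}
--     seen = {start}
--     frontier = {start}
--
--     for i in range(1, max_hop + 1):
--         next_layer = set()
--         for u in frontier:
--             for v in in_neighbors.get(u, set()):
--                 v = str(v)
--                 if v not in seen:
--                     seen.add(v)
--                     next_layer.add(v)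
--         layers[i] = next_layer
--         frontier = next_layer
--         if not frontier:
--             break
--
--     return layers
-- ===== SOURCE B (Python) =====
-- def _reach(start, in_neighbors, k):
--     """nodes within <= k in-hops of start: k rounds of closure s |= N(s)"""
--     s = {start}
--     for _ in range(k):
--         s = s | {str(v) for u in s for v in in_neighbors.get(u, set())}
--     return s
--
-- def bfs_inward_layers(start, in_neighbors, max_hop):
--     # Stateless layered closure instead of frontier BFS: layer i is recomputed as
--     # the set difference reach(i) - reach(i-1); no seen/frontier state is threaded.
--     start = str(start)
--     layers = {}
--     for i in range(1, max_hop + 1):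
--         layer = _reach(start, in_neighbors, i) - _reach(start, in_neighbors, i - 1)
--         layers[i] = layer
--         if not layer:
--             break
--     return layers
-- ===== Notes on version B (the rewrite author's own statement) =====
-- stated objective: alternative
-- what changed: A is an incremental frontier BFS threading seen/frontier/layers state through one loop; B keeps no traversal state at all: it recomputes reach(k), the set of nodes within k in-hops, by k closure rounds s |= N(s), and emits layer i as the set difference reach(i) - reach(i-1), stopping at the first empty difference.
import Mathlib
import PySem

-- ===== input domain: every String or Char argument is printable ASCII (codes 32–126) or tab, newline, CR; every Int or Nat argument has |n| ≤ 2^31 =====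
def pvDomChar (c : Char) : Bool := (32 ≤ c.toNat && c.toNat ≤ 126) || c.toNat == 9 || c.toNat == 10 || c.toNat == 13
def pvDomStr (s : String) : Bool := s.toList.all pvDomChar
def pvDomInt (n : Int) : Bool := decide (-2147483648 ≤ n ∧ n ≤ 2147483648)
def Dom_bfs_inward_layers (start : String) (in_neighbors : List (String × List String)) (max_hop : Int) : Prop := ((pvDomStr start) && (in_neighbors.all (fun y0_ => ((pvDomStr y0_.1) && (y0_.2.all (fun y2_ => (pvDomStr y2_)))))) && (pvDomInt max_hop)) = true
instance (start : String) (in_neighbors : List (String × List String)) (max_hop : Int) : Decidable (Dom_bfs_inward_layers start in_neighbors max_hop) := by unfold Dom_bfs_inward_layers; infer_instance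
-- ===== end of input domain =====

-- B replaces A's incremental frontier BFS (seen/frontier/layers state threaded through
-- one loop) by a stateless layered closure: reach(k) = k rounds of s |= N(s), and
-- layer i = reach(i) - reach(i-1) (objective: alternative; not faster).
-- Per-layer SETS: the Lean lists are one insertion-order representative of Python's sets.

-- ===== PORT A =====
-- in_neighbors.get(u, set()): first-match association-list lookup with default []
def pvNbrs (nb : List (String × List String)) (u : String) : List String :=
  (PySem.Dict.mk nb).getD u []

-- inner body: 'if v not in seen: seen.add(v); next_layer.add(v)' — Set.add on a
-- non-member appends, so the explicit append after the membership test is exact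
def pvAStep (st : List String × List String) (v : String) : List String × List String :=
  if st.1.contains v then st else (st.1 ++ [v], st.2 ++ [v])

-- 'for i in range(1, max_hop+1): … if not frontier: break' — fuel = number of
-- remaining range elements (max_hop.toNat in total), break when next_layer is empty
def pvA_loop (nb : List (String × List String)) :
    Nat → Int → PySem.Dict Int (List String) → List String → List String →
      PySem.Dict Int (List String)
  | 0, _, layers, _, _ => layers
  | fuel+1, i, layers, seen, frontier =>
    let st := frontier.foldl (fun st u => (pvNbrs nb u).foldl pvAStep st) (seen, [])
    let layers' := layers.insert i st.2
    if st.2.isEmpty then layers' else pvA_loop nb fuel (i+1) layers' st.1 st.2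

def bfs_inward_layers (start : String) (in_neighbors : List (String × List String)) (max_hop : Int) : List (Int × List String) :=
  (pvA_loop in_neighbors max_hop.toNat 1 PySem.Dict.empty [start] [start]).items

-- ===== PORT B =====
-- _reach(start, in_neighbors, k): s = {start}; k times s = s | {str(v) for u in s …}
def pvReachGo (nb : List (String × List String)) (start : String) : Nat → List String
  | 0 => [start]
  | k+1 =>
    let s := pvReachGo nb start k
    PySem.Set.union s (PySem.Set.ofList (s.flatMap (pvNbrs nb)))

def pvReach (nb : List (String × List String)) (start : String) (k : Int) : List String :=
  pvReachGo nb start k.toNat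

-- 'for i in range(1, max_hop+1): layer = reach(i) - reach(i-1); … if not layer: break'
def pvB_loop (nb : List (String × List String)) (start : String) :
    Nat → Int → PySem.Dict Int (List String) → PySem.Dict Int (List String)
  | 0, _, layers => layers
  | fuel+1, i, layers =>
    let layer := PySem.Set.diff (pvReach nb start i) (pvReach nb start (i-1))
    let layers' := layers.insert i layer
    if layer.isEmpty then layers' else pvB_loop nb start fuel (i+1) layers'

def bfs_inward_layers_alt (start : String) (in_neighbors : List (String × List String)) (max_hop : Int) : List (Int × List String) :=
  (pvB_loop in_neighbors start max_hop.toNat 1 PySem.Dict.empty).items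

-- ===== PRECONDITION & SPEC =====
def Spec_bfs_inward_layers (start : String) (in_neighbors : List (String × List String)) (max_hop : Int) (out : List (Int × List String)) : Prop := out = bfs_inward_layers_alt start in_neighbors max_hop
instance (start : String) (in_neighbors : List (String × List String)) (max_hop : Int) (out : List (Int × List String)) : Decidable (Spec_bfs_inward_layers start in_neighbors max_hop out) := by unfold Spec_bfs_inward_layers; infer_instance

-- ===== CLAIM (what is proved, stated in full; the proofs are below) =====
def Claim_equal_bfs_inward_layers : Prop := ∀ (start : String) (in_neighbors : List (String × List String)) (max_hop : Int), Dom_bfs_inward_layers start in_neighbors max_hop → Spec_bfs_inward_layers start in_neighbors max_hop (bfs_inward_layers start in_neighbors max_hop)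

-- ===== LEMMAS AND PROOFS =====

-- the sublist of cands not yet in seen, deduplicated, in order
def pvFresh (seen : List String) : List String → List String
  | [] => []
  | v :: vs => if seen.contains v then pvFresh seen vs else v :: pvFresh (seen ++ [v]) vs

-- A's layer-(k) frontier: the fresh nodes discovered at depth k
def pvFrontG (nb : List (String × List String)) (start : String) : Nat → List String
  | 0 => [start]
  | k+1 => pvFresh (pvReachGo nb start k) ((pvFrontG nb start k).flatMap (pvNbrs nb))

theorem pvA_fold (cands : List String) : ∀ (seen acc : List String),
    cands.foldl pvAStep (seen, acc) =
      (seen ++ pvFresh seen cands, acc ++ pvFresh seen cands) := by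
  induction cands with
  | nil => intro seen acc; simp [pvFresh]
  | cons v vs ih =>
    intro seen acc
    by_cases h : v ∈ seen
    · simp [pvAStep, pvFresh, h, ih]
    · simp only [List.foldl_cons, pvAStep, pvFresh, List.contains_eq_mem, h,
        decide_false, Bool.false_eq_true, if_neg, not_false_eq_true, ih]
      simp

theorem pvNested_fold (front : List String) (g : String → List String)
    (f : (List String × List String) → String → (List String × List String)) :
    ∀ st, front.foldl (fun st u => (g u).foldl f st) st = (front.flatMap g).foldl f st := by
  induction front with
  | nil => intro st; simp
  | cons u us ih => intro st; simp [List.flatMap_cons, List.foldl_append, ih]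

theorem pvFoldl_add (L : List String) : ∀ (S : List String),
    L.foldl PySem.Set.add S = S ++ pvFresh S L := by
  induction L with
  | nil => intro S; simp [pvFresh]
  | cons v vs ih =>
    intro S
    by_cases h : v ∈ S
    · simp [PySem.Set.add, PySem.Set.contains, pvFresh, h, ih]
    · simp only [List.foldl_cons, PySem.Set.add, PySem.Set.contains,
        List.contains_eq_mem, h, decide_false, Bool.false_eq_true, if_neg,
        not_false_eq_true, ih, pvFresh]
      simp

theorem pvFresh_fresh (L : List String) : ∀ (S T : List String),
    (∀ x ∈ T, x ∈ S) → pvFresh S (pvFresh T L) = pvFresh S L := by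
  induction L with
  | nil => intro S T _; simp [pvFresh]
  | cons v vs ih =>
    intro S T hTS
    by_cases hT : v ∈ T
    · have hS : v ∈ S := hTS v hT
      simp only [pvFresh, List.contains_eq_mem, hT, decide_true, if_pos]
      simp only [hS, decide_true, if_pos]
      exact ih S T hTS
    · by_cases hS : v ∈ S
      · simp only [pvFresh, List.contains_eq_mem, hT, decide_false,
          Bool.false_eq_true, if_neg, not_false_eq_true]
        simp only [hS, decide_true, if_pos]
        refine ih S (T ++ [v]) ?_
        intro x hx
        rcases List.mem_append.mp hx with h | h
        · exact hTS x h
        · simp only [List.mem_singleton] at h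
          exact h ▸ hS
      · simp only [pvFresh, List.contains_eq_mem, hT, hS, decide_false,
          Bool.false_eq_true, if_neg, not_false_eq_true]
        congr 1
        refine ih (S ++ [v]) (T ++ [v]) ?_
        intro x hx
        rcases List.mem_append.mp hx with h | h
        · exact List.mem_append.mpr (Or.inl (hTS x h))
        · exact List.mem_append.mpr (Or.inr h)

theorem pvUnion_ofList (S L : List String) :
    PySem.Set.union S (PySem.Set.ofList L) = S ++ pvFresh S L := by
  have h1 : PySem.Set.ofList L = pvFresh [] L := by
    simpa [PySem.Set.ofList, PySem.Set.empty] using pvFoldl_add L []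
  calc PySem.Set.union S (PySem.Set.ofList L)
      = (PySem.Set.ofList L).foldl PySem.Set.add S := rfl
    _ = S ++ pvFresh S (PySem.Set.ofList L) := pvFoldl_add _ S
    _ = S ++ pvFresh S L := by rw [h1, pvFresh_fresh L S [] (by simp)]

theorem pvFresh_skip (L1 : List String) : ∀ (S L2 : List String),
    (∀ x ∈ L1, x ∈ S) → pvFresh S (L1 ++ L2) = pvFresh S L2 := by
  induction L1 with
  | nil => intro S L2 _; simp
  | cons v vs ih =>
    intro S L2 h
    have hv : v ∈ S := h v (by simp)
    simp only [List.cons_append, pvFresh, List.contains_eq_mem, hv, decide_true, if_pos]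
    exact ih S L2 (fun x hx => h x (by simp [hx]))

theorem pvMem_fresh (L : List String) : ∀ (S : List String), ∀ v ∈ L, v ∈ S ++ pvFresh S L := by
  induction L with
  | nil => intro S v hv; cases hv
  | cons w ws ih =>
    intro S v hv
    by_cases hw : w ∈ S
    · simp only [pvFresh, List.contains_eq_mem, hw, decide_true, if_pos]
      rcases List.mem_cons.mp hv with rfl | hv
      · simpa using Or.inl hw
      · exact ih S v hv
    · simp only [pvFresh, List.contains_eq_mem, hw, decide_false, Bool.false_eq_true,
        if_neg, not_false_eq_true]
      rcases List.mem_cons.mp hv with rfl | hv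
      · simp
      · have := ih (S ++ [w]) v hv
        rcases List.mem_append.mp this with h | h
        · rcases List.mem_append.mp h with h | h
          · exact List.mem_append.mpr (Or.inl h)
          · simp at h; simp [h]
        · refine List.mem_append.mpr (Or.inr ?_); simp [h]

theorem pvFresh_not_mem (L : List String) : ∀ (S : List String), ∀ v ∈ pvFresh S L, v ∉ S := by
  induction L with
  | nil => intro S v hv; cases hv
  | cons w ws ih =>
    intro S v hv
    by_cases hw : w ∈ S
    · simp only [pvFresh, List.contains_eq_mem, hw, decide_true, if_pos] at hv
      exact ih S v hv
    · simp only [pvFresh, List.contains_eq_mem, hw, decide_false, Bool.false_eq_true,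
        if_neg, not_false_eq_true] at hv
      rcases List.mem_cons.mp hv with rfl | hv
      · exact hw
      · intro hvS
        exact ih (S ++ [w]) v hv (List.mem_append.mpr (Or.inl hvS))

-- reach grows by exactly the frontier, and is closed under neighbors one step later
theorem pvChain (nb : List (String × List String)) (start : String) : ∀ (k : Nat),
    pvReachGo nb start (k+1) = pvReachGo nb start k ++ pvFrontG nb start (k+1) ∧
    (∀ v ∈ (pvReachGo nb start k).flatMap (pvNbrs nb), v ∈ pvReachGo nb start (k+1)) := by
  intro k
  induction k with
  | zero =>
    constructor
    · show PySem.Set.union _ _ = _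
      rw [pvUnion_ofList]
      rfl
    · intro v hv
      show v ∈ PySem.Set.union _ _
      rw [pvUnion_ofList]
      exact pvMem_fresh _ _ v hv
  | succ k ih =>
    have hstep : pvReachGo nb start (k+2) =
        pvReachGo nb start (k+1) ++ pvFrontG nb start (k+2) := by
      show PySem.Set.union _ _ = _
      rw [pvUnion_ofList]
      congr 1
      rw [show (pvReachGo nb start (k+1)).flatMap (pvNbrs nb) =
            ((pvReachGo nb start k).flatMap (pvNbrs nb)) ++
              ((pvFrontG nb start (k+1)).flatMap (pvNbrs nb)) from by
        conv_lhs => rw [ih.1]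
        rw [List.flatMap_append]]
      rw [pvFresh_skip _ _ _ ih.2]
      rfl
    refine ⟨hstep, ?_⟩
    intro v hv
    show v ∈ PySem.Set.union _ _
    rw [pvUnion_ofList]
    exact pvMem_fresh _ _ v hv

theorem pvDiff_reach (nb : List (String × List String)) (start : String) (k : Nat) :
    PySem.Set.diff (pvReachGo nb start (k+1)) (pvReachGo nb start k) =
      pvFrontG nb start (k+1) := by
  show List.filter _ _ = _
  rw [(pvChain nb start k).1, List.filter_append]
  have h1 : (pvReachGo nb start k).filter
      (fun x => !PySem.Set.contains (pvReachGo nb start k) x) = [] := by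
    rw [List.filter_eq_nil_iff]
    intro x hx
    simp [PySem.Set.contains, List.contains_eq_mem, hx]
  have h2 : (pvFrontG nb start (k+1)).filter
      (fun x => !PySem.Set.contains (pvReachGo nb start k) x) = pvFrontG nb start (k+1) := by
    rw [List.filter_eq_self]
    intro x hx
    have := pvFresh_not_mem _ _ x hx
    simp [PySem.Set.contains, List.contains_eq_mem, this]
  rw [h1, h2, List.nil_append]

theorem pvLoop_eq (nb : List (String × List String)) (start : String) (fuel : Nat) :
    ∀ (k : Nat) (layers : PySem.Dict Int (List String)),
      pvA_loop nb fuel ((k : Int)+1) layers (pvReachGo nb start k) (pvFrontG nb start k) =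
      pvB_loop nb start fuel ((k : Int)+1) layers := by
  induction fuel with
  | zero => intro k layers; rfl
  | succ n ih =>
    intro k layers
    have hfold : (pvFrontG nb start k).foldl
        (fun st u => (pvNbrs nb u).foldl pvAStep st) (pvReachGo nb start k, []) =
        (pvReachGo nb start k ++ pvFrontG nb start (k+1), pvFrontG nb start (k+1)) := by
      rw [pvNested_fold, pvA_fold]
      rfl
    have hhi : pvReach nb start ((k : Int)+1) = pvReachGo nb start (k+1) := by
      unfold pvReach
      rw [show ((k : Int)+1).toNat = k+1 from by omega]
    have hlo : pvReach nb start ((k : Int)+1-1) = pvReachGo nb start k := by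
      unfold pvReach
      rw [show ((k : Int)+1-1).toNat = k from by omega]
    have hlayer : PySem.Set.diff (pvReach nb start ((k : Int)+1))
        (pvReach nb start ((k : Int)+1-1)) = pvFrontG nb start (k+1) := by
      rw [hhi, hlo, pvDiff_reach]
    simp only [pvA_loop, pvB_loop, hfold, hlayer]
    split
    · rfl
    · have := ih (k+1) (layers.insert ((k : Int)+1) (pvFrontG nb start (k+1)))
      rw [(pvChain nb start k).1] at this
      push_cast at this
      exact this

-- ===== VERDICT (by name: the statement is the Claim_ definition above) =====
theorem bfs_inward_layers_spec : Claim_equal_bfs_inward_layers := by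
  intro start nb max_hop _
  unfold Spec_bfs_inward_layers bfs_inward_layers bfs_inward_layers_alt
  have := pvLoop_eq nb start max_hop.toNat 0 PySem.Dict.empty
  simp only [Nat.cast_zero, zero_add] at this
  rw [show pvReachGo nb start 0 = [start] from rfl,
      show pvFrontG nb start 0 = [start] from rfl] at this
  rw [this]
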